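-- pv_equiv track=rewrite | github.com/Niikcety/Web-Crawler | Statistics/statistics_utils.py | server_type_simplifier
-- ===== SOURCE A (Python) =====
-- def server_type_simplifier(records):
--     server_types_dictionary = dict()
--     for record in records:
--         server, count = record
--         s_type = server.split('/', 1)[0]
--         if s_type in server_types_dictionary.keys():
--             server_types_dictionary[s_type] += count
--         else:
--             server_types_dictionary[s_type] = count
--     return server_types_dictionary
-- ===== SOURCE B (Python) =====
-- def server_type_simplifier(records):
--     keys = dict.fromkeys(server.split('/', 1)[0] for server, _ in records)
--     return {key: sum(count for server, count in records
--                      if server.split('/', 1)[0] == key)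
--             for key in keys}
-- ===== Notes on version B (the rewrite author's own statement) =====
-- stated objective: alternative
-- what changed: Replaces the single-pass incremental dict accumulation with a two-phase decomposition: first collect the distinct prefix keys in first-occurrence order with dict.fromkeys, then build the result by summing, per key, the counts of all matching records.
import Mathlib
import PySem

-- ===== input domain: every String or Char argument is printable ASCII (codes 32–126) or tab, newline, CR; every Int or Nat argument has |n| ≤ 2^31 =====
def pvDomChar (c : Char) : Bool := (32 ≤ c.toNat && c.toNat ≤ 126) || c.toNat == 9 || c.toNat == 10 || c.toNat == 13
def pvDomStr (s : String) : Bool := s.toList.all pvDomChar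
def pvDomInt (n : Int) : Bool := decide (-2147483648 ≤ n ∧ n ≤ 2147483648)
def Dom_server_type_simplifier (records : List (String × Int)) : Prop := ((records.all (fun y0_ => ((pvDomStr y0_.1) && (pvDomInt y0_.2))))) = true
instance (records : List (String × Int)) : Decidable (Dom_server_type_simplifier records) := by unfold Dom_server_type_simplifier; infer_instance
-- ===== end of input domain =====

-- B replaces A's single-pass incremental dict accumulation by a two-phase pass:
-- distinct prefix keys in first-occurrence order, then a per-key sum over all records ("alternative").

-- server.split('/', 1)[0]: the separator is nonempty so splitMax? is some and the
-- result list is nonempty, hence Python's [0] never raises; headD "" is exact here.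
def pvKeyOf (s : String) : String := ((PySem.Str.splitMax? s "/" 1).getD []).headD ""

-- ===== PORT A =====
def server_type_simplifier (records : List (String × Int)) : List (String × Int) :=
  (records.foldl (fun d (r : String × Int) =>
      let s_type := pvKeyOf r.1
      if d.contains s_type then d.modify s_type 0 (· + r.2)   -- d[s_type] += count
      else d.insert s_type r.2)
    (PySem.Dict.empty : PySem.Dict String Int)).items

-- ===== PORT B =====
def server_type_simplifier_alt (records : List (String × Int)) : List (String × Int) :=
  (PySem.List.dedup (records.map (fun r => pvKeyOf r.1))).map
    (fun k => (k, ((records.filter (fun r => pvKeyOf r.1 == k)).map (·.2)).sum))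

-- ===== PRECONDITION & SPEC =====
def Spec_server_type_simplifier (records : List (String × Int)) (out : List (String × Int)) : Prop := out = server_type_simplifier_alt records
instance (records : List (String × Int)) (out : List (String × Int)) : Decidable (Spec_server_type_simplifier records out) := by unfold Spec_server_type_simplifier; infer_instance

-- ===== CLAIM (what is proved, stated in full; the proofs are below) =====
def Claim_equal_server_type_simplifier : Prop := ∀ (records : List (String × Int)), Dom_server_type_simplifier records → Spec_server_type_simplifier records (server_type_simplifier records)

-- ===== LEMMAS AND PROOFS =====

-- A's loop body equals an unconditional modify with default 0.
theorem pv_step_eq_modify (d : PySem.Dict String Int) (r : String × Int) :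
    (let s_type := pvKeyOf r.1
     if d.contains s_type then d.modify s_type 0 (· + r.2) else d.insert s_type r.2)
    = d.modify (pvKeyOf r.1) 0 (· + r.2) := by
  by_cases h : d.contains (pvKeyOf r.1) = true
  · simp [h]
  · simp only [Bool.not_eq_true] at h
    simp [PySem.Dict.modify, PySem.Dict.getD_of_not_contains _ _ h]

theorem pv_getD_fold (l : List (String × Int)) (d : PySem.Dict String Int) (k : String) :
    (l.foldl (fun d r => d.modify (pvKeyOf r.1) 0 (· + r.2)) d).getD k 0
    = d.getD k 0 + ((l.filter (fun r => pvKeyOf r.1 == k)).map (·.2)).sum := by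
  induction l generalizing d with
  | nil => simp
  | cons r l ih =>
    simp only [List.foldl_cons, List.filter_cons, ih]
    by_cases h : k = pvKeyOf r.1
    · simp [h]
      ring
    · have hb : (pvKeyOf r.1 == k) = false := by
        simp only [beq_eq_false_iff_ne, ne_eq]
        exact fun hh => h hh.symm
      simp [hb, PySem.Dict.getD_modify, h]

theorem server_type_simplifier_spec : Claim_equal_server_type_simplifier := by
  intro records _
  unfold Spec_server_type_simplifier server_type_simplifier server_type_simplifier_alt
  have hstep : records.foldl (fun d (r : String × Int) =>
      let s_type := pvKeyOf r.1
      if d.contains s_type then d.modify s_type 0 (· + r.2) else d.insert s_type r.2)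
      (PySem.Dict.empty : PySem.Dict String Int)
      = records.foldl (fun d r => d.modify (pvKeyOf r.1) 0 (· + r.2)) PySem.Dict.empty := by
    exact PySem.List.foldl_congr_mem _ _ _ _ (fun d r _ => pv_step_eq_modify d r)
  rw [hstep]
  have hnd : (records.foldl (fun d r => d.modify (pvKeyOf r.1) 0 (· + r.2)) (PySem.Dict.empty : PySem.Dict String Int)).keys.Nodup := by
    exact PySem.Dict.nodup_keys_foldl_modify_key _ _ _ _ _ (by simp)
  have hkeys : (records.foldl (fun d r => d.modify (pvKeyOf r.1) 0 (· + r.2)) (PySem.Dict.empty : PySem.Dict String Int)).keys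
      = PySem.List.dedup (records.map (fun r => pvKeyOf r.1)) := by
    rw [PySem.Dict.keys_foldl_modify_key]
    simp [PySem.Dict.keys_empty, PySem.Set.update_nil_left]
  rw [PySem.Dict.items_eq_map_keys _ hnd 0, hkeys]
  exact List.map_congr_left (fun k _ => by rw [pv_getD_fold]; simp)
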